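-- pv_equiv track=rewrite | github.com/JeremyMet/Mysterion128 | src/const_computation.py | vecMult
-- ===== SOURCE A (Python) =====
-- def multGF16(A, B):
--     ret = 0 ;
--     while(A > 0):
--         ret ^= (B*(A&1));
--         A >>= 1;
--         B <<= 1;
--         if (B&0b10000):
--             B ^= 0b10011;
--     return ret;
--
-- def vecMult(A, v):
--     nb_row = len(v);
--     nb_column = len(A);
--     ret = [0 for _ in range(nb_column)];
--     for i in range(nb_column):
--         tmp = 0b000;
--         for k in range(nb_row):
--             tmp ^= multGF16(A[i][k], v[k]);
--         ret[i] = tmp;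
--     return ret;
-- ===== SOURCE B (Python) =====
-- def multGF16(A, B):
--     # MSB-first Horner evaluation: shift-reduce the accumulator once per bit
--     # of A, XOR-ing B in where the bit is set.
--     res = 0
--     if A > 0:
--         for bit in bin(A)[2:]:
--             res <<= 1
--             if res & 0b10000:
--                 res ^= 0b10011
--             if bit == '1':
--                 res ^= B
--     return res
--
-- def vecMult(A, v):
--     out = []
--     for row in A:
--         acc = 0
--         for a, b in zip(row, v):
--             acc ^= multGF16(a, b)
--         out.append(acc)
--     return out
-- ===== Notes on version B (the rewrite author's own statement) =====
-- stated objective: alternative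
-- what changed: multGF16 is re-implemented as an MSB-first Horner evaluation over bin(A) (shift-and-conditionally-reduce the accumulator, XOR in B where the bit is set) instead of the LSB-first shift-and-add that mutates B, and vecMult is rebuilt as zip-based folds over the rows instead of index loops writing into a preallocated list.
import Mathlib
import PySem

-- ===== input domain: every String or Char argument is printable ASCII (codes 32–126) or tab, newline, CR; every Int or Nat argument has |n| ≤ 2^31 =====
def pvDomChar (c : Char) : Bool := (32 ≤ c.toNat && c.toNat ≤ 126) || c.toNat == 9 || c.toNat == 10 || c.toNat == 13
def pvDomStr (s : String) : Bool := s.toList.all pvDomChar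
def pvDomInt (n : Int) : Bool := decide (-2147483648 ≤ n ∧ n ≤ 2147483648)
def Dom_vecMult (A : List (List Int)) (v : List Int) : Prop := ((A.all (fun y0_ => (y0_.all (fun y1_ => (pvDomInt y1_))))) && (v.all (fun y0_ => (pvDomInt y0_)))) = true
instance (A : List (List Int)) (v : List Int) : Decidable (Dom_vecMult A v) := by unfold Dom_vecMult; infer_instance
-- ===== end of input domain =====

-- B replaces the LSB-first shift-and-add multGF16 by an MSB-first Horner loop over bin(A)
-- and vecMult's index loops by zip-based row folds (objective: alternative, same cost).

-- ===== PORT A =====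
-- termination helper for A's while-loop (A >>= 1 strictly shrinks a positive A)
theorem pvShr1_toNat_lt (A : Int) (h : 0 < A) : (A >>> (1:Nat)).toNat < A.toNat := by
  rcases A with n | n
  · rw [Int.ofNat_eq_natCast] at h
    have hn : 0 < n := by exact_mod_cast h
    show n >>> 1 < n
    simp only [Nat.shiftRight_succ, Nat.shiftRight_zero]
    omega
  · exact absurd h (not_lt.mpr (le_of_lt (Int.negSucc_lt_zero n)))

-- the while-loop of multGF16, state (ret, A, B); 'if (B&0b10000):' is 'band ≠ 0' (truthiness)
def multGF16Loop (ret A B : Int) : Int :=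
  if h : 0 < A then
    multGF16Loop (PySem.Int.bxor ret (B * PySem.Int.band A 1)) (A >>> (1:Nat))
      (let b2 := B <<< (1:Nat)
       if PySem.Int.band b2 16 ≠ 0 then PySem.Int.bxor b2 19 else b2)
  else ret
termination_by A.toNat
decreasing_by exact pvShr1_toNat_lt A h

def multGF16 (a b : Int) : Int := multGF16Loop 0 a b

-- indices i < len(A) and k < len(v) are always in range, so getD is exact there; A[i][k]
-- may be out of range (Python IndexError) — exactly those inputs are excluded by Pre_vecMult
def vecMult (A : List (List Int)) (v : List Int) : List Int :=
  let nbRow := v.length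
  let nbCol := A.length
  (List.range nbCol).foldl
    (fun ret i =>
      ret.set i ((List.range nbRow).foldl
        (fun tmp k => PySem.Int.bxor tmp (multGF16 ((A.getD i []).getD k 0) (v.getD k 0))) 0))
    (List.replicate nbCol (0:Int))

-- ===== PORT B =====
-- the digit string bin(n)[2:] of a positive n, as bits MSB-first (exact model of Source B's loop)
def bitsMSB (n : Nat) : List Bool :=
  if h : n = 0 then [] else bitsMSB (n / 2) ++ [decide (n % 2 = 1)]
termination_by n
decreasing_by exact Nat.div_lt_self (Nat.pos_of_ne_zero h) one_lt_two

def multGF16_alt (A B : Int) : Int :=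
  if 0 < A then
    (bitsMSB A.toNat).foldl
      (fun res bit =>
        let r1 := res <<< (1:Nat)
        let r2 := if PySem.Int.band r1 16 ≠ 0 then PySem.Int.bxor r1 19 else r1
        if bit then PySem.Int.bxor r2 B else r2) 0
  else 0

def vecMult_alt (A : List (List Int)) (v : List Int) : List Int :=
  A.map (fun row =>
    (row.zip v).foldl (fun acc p => PySem.Int.bxor acc (multGF16_alt p.1 p.2)) 0)

-- ===== PRECONDITION & SPEC =====
-- Pre_ excludes exactly the inputs where A raises IndexError (some row of A shorter than v,
-- hit at A[i][k]); B's zip simply truncates the pairing there and still returns a value.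
def Pre_vecMult (A : List (List Int)) (v : List Int) : Prop := ∀ row ∈ A, v.length ≤ row.length
instance (A : List (List Int)) (v : List Int) : Decidable (Pre_vecMult A v) := by unfold Pre_vecMult; infer_instance

def pvWitness_vecMult : List (List Int) × List Int := ([[1, 2], [3, 4]], [5, 6])

def Spec_vecMult (A : List (List Int)) (v : List Int) (out : List Int) : Prop := out = vecMult_alt A v
instance (A : List (List Int)) (v : List Int) (out : List Int) : Decidable (Spec_vecMult A v out) := by unfold Spec_vecMult; infer_instance

-- ===== CLAIM (what is proved, stated in full; the proofs are below) =====
def Claim_equal_vecMult : Prop := ∀ (A : List (List Int)) (v : List Int), Dom_vecMult A v → Pre_vecMult A v → Spec_vecMult A v (vecMult A v)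

-- ===== LEMMAS AND PROOFS =====

-- the shift-and-conditional-reduce step both loops apply (x << 1, xor 0b10011 if bit 4 set)
def gfStep (x : Int) : Int :=
  let y := x <<< (1:Nat)
  if PySem.Int.band y 16 ≠ 0 then PySem.Int.bxor y 19 else y

-- reference form of A's loop: the result as a right recursion (accumulator removed)
def fRef (A B : Int) : Int :=
  if h : 0 < A then PySem.Int.bxor (B * PySem.Int.band A 1) (fRef (A >>> (1:Nat)) (gfStep B))
  else 0
termination_by A.toNat
decreasing_by exact pvShr1_toNat_lt A h

-- bxor on Int constructors
theorem pv_bxor_ofNat_ofNat (m n : Nat) : PySem.Int.bxor (Int.ofNat m) (Int.ofNat n) = Int.ofNat (m ^^^ n) := by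
  simp [PySem.Int.bxor, Int.ofNat_eq_natCast]

theorem pv_bxor_ofNat_negSucc (m n : Nat) : PySem.Int.bxor (Int.ofNat m) (Int.negSucc n) = Int.negSucc (m ^^^ n) := by
  simp [PySem.Int.bxor, Int.ofNat_eq_natCast, Int.negSucc_eq]
  rw [if_neg (by omega)]; omega

theorem pv_bxor_negSucc_ofNat (m n : Nat) : PySem.Int.bxor (Int.negSucc m) (Int.ofNat n) = Int.negSucc (m ^^^ n) := by
  simp [PySem.Int.bxor, Int.ofNat_eq_natCast, Int.negSucc_eq]
  rw [if_neg (by omega)]; omega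

theorem pv_bxor_negSucc_negSucc (m n : Nat) : PySem.Int.bxor (Int.negSucc m) (Int.negSucc n) = Int.ofNat (m ^^^ n) := by
  simp [PySem.Int.bxor, Int.ofNat_eq_natCast, Int.negSucc_eq]
  rw [if_neg (by omega), if_neg (by omega)]
  try norm_num

theorem pv_bxor_assoc (a b c : Int) : PySem.Int.bxor (PySem.Int.bxor a b) c = PySem.Int.bxor a (PySem.Int.bxor b c) := by
  rcases a with m | m <;> rcases b with n | n <;> rcases c with k | k <;>
    simp only [pv_bxor_ofNat_ofNat, pv_bxor_ofNat_negSucc, pv_bxor_negSucc_ofNat,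
      pv_bxor_negSucc_negSucc, Nat.xor_assoc]

theorem pv_bxor_zero_left (a : Int) : PySem.Int.bxor 0 a = a := by
  rw [PySem.Int.bxor_comm]; exact PySem.Int.bxor_zero a

-- shifting left by one on Int constructors
theorem pv_shl1_ofNat (n : Nat) : (Int.ofNat n) <<< (1:Nat) = Int.ofNat (2 * n) := by
  show Int.ofNat (n <<< 1) = _
  rw [Nat.shiftLeft_eq]; norm_num; ring

theorem pv_shl1_negSucc (n : Nat) : (Int.negSucc n) <<< (1:Nat) = Int.negSucc (2 * n + 1) := by
  show Int.negSucc ((n+1) <<< 1 - 1) = _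
  rw [Nat.shiftLeft_eq]; norm_num; ring_nf

-- low-bit xor arithmetic on Nat
theorem pv_nat_dxor (c1 c2 : Bool) (m n : Nat) :
    (Nat.bit c1 m) ^^^ (Nat.bit c2 n) = Nat.bit (bne c1 c2) (m ^^^ n) := Nat.xor_bit c1 m c2 n

-- xor distributes over doubling
theorem pv_shl1_bxor (a b : Int) : (PySem.Int.bxor a b) <<< (1:Nat) = PySem.Int.bxor (a <<< (1:Nat)) (b <<< (1:Nat)) := by
  rcases a with m | m <;> rcases b with n | n <;>
    simp only [pv_bxor_ofNat_ofNat, pv_bxor_ofNat_negSucc, pv_bxor_negSucc_ofNat,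
      pv_bxor_negSucc_negSucc, pv_shl1_ofNat, pv_shl1_negSucc] <;>
    congr 1
  · have := pv_nat_dxor false false m n; simpa [Nat.bit] using this.symm
  · have := pv_nat_dxor false true m n; simpa [Nat.bit] using this.symm
  · have := pv_nat_dxor true false m n; simpa [Nat.bit] using this.symm
  · have := pv_nat_dxor true true m n; simpa [Nat.bit] using this.symm

-- the reduce condition (bit 4) on Int constructors
theorem pv_bit4_ofNat (n : Nat) : (PySem.Int.band (Int.ofNat n) 16 ≠ 0) ↔ n.testBit 4 := by
  have h16 : (16:Int) = ((16:Nat) : Int) := by norm_num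
  rw [Int.ofNat_eq_natCast, h16, PySem.Int.band_natCast]
  have : n &&& 16 = (n.testBit 4).toNat * 16 := by
    have := Nat.and_two_pow n 4; norm_num at this; exact this
  rw [this]; cases n.testBit 4 <;> simp

theorem pv_bit4_negSucc (n : Nat) : (PySem.Int.band (Int.negSucc n) 16 ≠ 0) ↔ ¬ n.testBit 4 := by
  have : PySem.Int.band (Int.negSucc n) 16 = ((16 - (16 &&& n) : Nat) : Int) := by
    simp [PySem.Int.band, Int.negSucc_eq]
    intro h; exact absurd h (by omega)
  rw [this]
  have h2 : 16 &&& n = 16 * (n.testBit 4).toNat := by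
    have := Nat.two_pow_and n 4; norm_num at this; exact this
  rw [h2]; cases n.testBit 4 <;> simp

theorem pv_bit4_bxor (a b : Int) :
    (PySem.Int.band (PySem.Int.bxor a b) 16 ≠ 0) ↔ ¬ ((PySem.Int.band a 16 ≠ 0) ↔ (PySem.Int.band b 16 ≠ 0)) := by
  rcases a with m | m <;> rcases b with n | n <;>
    simp only [pv_bxor_ofNat_ofNat, pv_bxor_ofNat_negSucc, pv_bxor_negSucc_ofNat,
      pv_bxor_negSucc_negSucc, pv_bit4_ofNat, pv_bit4_negSucc, Nat.testBit_xor] <;>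
    cases hm : m.testBit 4 <;> cases hn : n.testBit 4 <;> simp

theorem pv_gfStep_zero : gfStep 0 = 0 := by decide

-- gfStep is xor-linear (the heart of the Horner ↔ shift-and-add equivalence)
theorem pv_gfStep_bxor (a b : Int) : gfStep (PySem.Int.bxor a b) = PySem.Int.bxor (gfStep a) (gfStep b) := by
  show (if PySem.Int.band ((PySem.Int.bxor a b) <<< (1:Nat)) 16 ≠ 0 then _ else _) = _
  rw [pv_shl1_bxor]
  set ya := a <<< (1:Nat) with hya
  set yb := b <<< (1:Nat) with hyb
  unfold gfStep
  rw [← hya, ← hyb]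
  by_cases hp : PySem.Int.band ya 16 ≠ 0 <;> by_cases hq : PySem.Int.band yb 16 ≠ 0
  · rw [if_neg, if_pos hp, if_pos hq]
    · rw [pv_bxor_assoc]
      congr 1
      rw [PySem.Int.bxor_comm yb 19, ← pv_bxor_assoc, PySem.Int.bxor_self, pv_bxor_zero_left]
    · rw [pv_bit4_bxor]; simp [hp, hq]
  · rw [if_pos, if_pos hp, if_neg hq]
    · rw [pv_bxor_assoc, pv_bxor_assoc]; congr 1; exact PySem.Int.bxor_comm yb 19
    · rw [pv_bit4_bxor]; simp [hp, hq]
  · rw [if_pos, if_neg hp, if_pos hq]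
    · rw [pv_bxor_assoc]
    · rw [pv_bit4_bxor]; simp [hp, hq]
  · rw [if_neg, if_neg hp, if_neg hq]
    · rw [pv_bit4_bxor]; simp [hp, hq]

-- A's loop with accumulator = accumulator xor the reference value
theorem pv_loop_eq (A : Int) : ∀ ret B, multGF16Loop ret A B = PySem.Int.bxor ret (fRef A B) := by
  induction hN : A.toNat using Nat.strong_induction_on generalizing A with
  | _ N IH =>
    intro ret B
    by_cases h : 0 < A
    · rw [multGF16Loop, fRef, dif_pos h, dif_pos h]
      rw [IH (A >>> (1:Nat)).toNat (hN ▸ pvShr1_toNat_lt A h) _ rfl]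
      rw [pv_bxor_assoc]
      rfl
    · rw [multGF16Loop, fRef, dif_neg h, dif_neg h, PySem.Int.bxor_zero]

theorem pv_mul_bit_gfStep (A B : Int) : gfStep (B * PySem.Int.band A 1) = gfStep B * PySem.Int.band A 1 := by
  have h1 : PySem.Int.band A 1 = PySem.Int.mod A 2 := PySem.Int.band_one A
  have h2 : PySem.Int.mod A 2 = 0 ∨ PySem.Int.mod A 2 = 1 := by
    have := PySem.Int.mod_nonneg A (b := 2) (by norm_num)
    have := PySem.Int.mod_lt A (b := 2) (by norm_num)
    omega
  rcases h2 with h2 | h2 <;> rw [h1, h2]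
  · simpa using pv_gfStep_zero
  · simp

-- gfStep commutes with the reference function in its second argument
theorem pv_fRef_gfStep (A : Int) : ∀ B, fRef A (gfStep B) = gfStep (fRef A B) := by
  induction hN : A.toNat using Nat.strong_induction_on generalizing A with
  | _ N IH =>
    intro B
    by_cases h : 0 < A
    · conv_lhs => rw [fRef]
      conv_rhs => rw [fRef]
      rw [dif_pos h, dif_pos h]
      rw [IH (A >>> (1:Nat)).toNat (hN ▸ pvShr1_toNat_lt A h) _ rfl]
      rw [pv_gfStep_bxor, pv_mul_bit_gfStep]
    · conv_lhs => rw [fRef]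
      conv_rhs => rw [fRef]
      rw [dif_neg h, dif_neg h]
      exact pv_gfStep_zero.symm

theorem pv_shr1_natCast (n : Nat) : ((n:Int) >>> (1:Nat)) = ((n/2 : Nat) : Int) := by
  show Int.ofNat (n >>> 1) = _
  simp [Nat.shiftRight_succ, Nat.shiftRight_zero]

theorem pv_band_one_natCast (n : Nat) : PySem.Int.band (n:Int) 1 = ((n % 2 : Nat) : Int) := by
  have h1 : (1:Int) = ((1:Nat):Int) := rfl
  rw [h1, PySem.Int.band_natCast, Nat.and_one_is_mod]

theorem pv_fRef_zero (B : Int) : fRef 0 B = 0 := by rw [fRef]; simp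

-- B's Horner fold over the bits equals the reference function
theorem pv_fold_bits (n : Nat) : 0 < n → ∀ B,
    (bitsMSB n).foldl (fun res bit => if bit then PySem.Int.bxor (gfStep res) B else gfStep res) 0
      = fRef (n : Int) B := by
  induction n using Nat.strong_induction_on with
  | _ n IH =>
    intro hn B
    rw [bitsMSB, dif_neg (by omega), List.foldl_append]
    by_cases hm : n / 2 = 0
    · have h1 : n = 1 := by omega
      subst h1
      rw [bitsMSB, dif_pos rfl]
      simp only [List.foldl_nil, List.foldl_cons]
      rw [fRef]
      norm_num
      have hs : ((1:Int) >>> (1:Nat)) = 0 := by decide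
      rw [hs, pv_fRef_zero, PySem.Int.bxor_zero, pv_gfStep_zero, pv_bxor_zero_left]
    · rw [IH (n/2) (Nat.div_lt_self hn one_lt_two) (by omega) B]
      conv_rhs => rw [fRef]
      rw [dif_pos (by exact_mod_cast hn)]
      rw [pv_shr1_natCast, pv_band_one_natCast, pv_fRef_gfStep]
      simp only [List.foldl_cons, List.foldl_nil]
      rcases Nat.mod_two_eq_zero_or_one n with hpar | hpar <;> rw [hpar]
      · simp [pv_bxor_zero_left]
      · simp [PySem.Int.bxor_comm]

theorem pv_mult_eq (a b : Int) : multGF16_alt a b = multGF16 a b := by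
  unfold multGF16_alt multGF16
  by_cases h : 0 < a
  · rw [if_pos h, pv_loop_eq, pv_bxor_zero_left]
    have := pv_fold_bits a.toNat (by omega) b
    rw [Int.toNat_of_nonneg (le_of_lt h)] at this
    exact this
  · rw [if_neg h, multGF16Loop, dif_neg h]

-- index-fold over a list via range/getD is the plain fold
theorem pv_foldl_range_getD {α β : Type} (zs : List α) (g : β → α → β) (d : α) :
    ∀ init, (List.range zs.length).foldl (fun a k => g a (zs.getD k d)) init = zs.foldl g init := by
  induction zs with
  | nil => intro init; simp
  | cons z zs ih =>
    intro init
    simp only [List.length_cons, List.range_succ_eq_map, List.foldl_cons, List.foldl_map,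
      List.getD_cons_zero, List.getD_cons_succ]
    exact ih (g init z)

-- writing f i into slot i of a list over range n fills its first n slots with f
theorem pv_foldl_set_aux (f : Nat → Int) : ∀ (n : Nat) (init : List Int), n ≤ init.length →
    (List.range n).foldl (fun ret i => ret.set i (f i)) init = (List.range n).map f ++ init.drop n := by
  intro n
  induction n with
  | zero => simp
  | succ n ih =>
    intro init h
    rw [List.range_succ, List.foldl_append, List.foldl_cons, List.foldl_nil, ih init (by omega),
      List.map_append, List.map_singleton]
    have hn : n < init.length := by omega
    rw [List.set_append]
    simp
    rw [List.drop_eq_getElem_cons hn, List.set_cons_zero]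

theorem pv_map_range_getD {α β : Type} (l : List α) (g : α → β) (d : α) :
    (List.range l.length).map (fun i => g (l.getD i d)) = l.map g := by
  induction l with
  | nil => simp
  | cons x xs ih =>
    simp only [List.length_cons, List.range_succ_eq_map, List.map_cons, List.map_map,
      List.getD_cons_zero]
    refine congrArg (g x :: ·) ?_
    have : ((fun i => g ((x :: xs).getD i d)) ∘ Nat.succ) = fun i => g (xs.getD i d) := by
      funext i; simp
    rw [this, ih]

-- one row: A's range/index inner loop equals B's zip fold (when the row is long enough)
theorem pv_row_eq (row v : List Int) (h : v.length ≤ row.length) :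
    (List.range v.length).foldl
        (fun tmp k => PySem.Int.bxor tmp (multGF16 (row.getD k 0) (v.getD k 0))) 0
      = (row.zip v).foldl (fun acc p => PySem.Int.bxor acc (multGF16_alt p.1 p.2)) 0 := by
  have hlen : (row.zip v).length = v.length := by
    rw [List.length_zip]; omega
  have hcong : (List.range v.length).foldl
      (fun tmp k => PySem.Int.bxor tmp (multGF16 (row.getD k 0) (v.getD k 0))) 0
      = (List.range ((row.zip v).length)).foldl
      (fun tmp k => PySem.Int.bxor tmp (multGF16 ((row.zip v).getD k (0,0)).1 ((row.zip v).getD k (0,0)).2)) 0 := by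
    rw [hlen]
    apply PySem.List.foldl_congr_mem
    intro a k hk
    rw [List.mem_range] at hk
    have hk1 : k < row.length := by omega
    have hk2 : k < (row.zip v).length := by omega
    rw [List.getD_eq_getElem _ _ hk1, List.getD_eq_getElem _ _ hk, List.getD_eq_getElem _ _ hk2,
      List.getElem_zip]
  rw [hcong]
  refine Eq.trans (pv_foldl_range_getD (row.zip v)
    (fun acc p => PySem.Int.bxor acc (multGF16 p.1 p.2)) (0,0) 0) ?_
  apply PySem.List.foldl_congr_mem
  intro a p _
  rw [pv_mult_eq]

theorem pv_main (M : List (List Int)) (v : List Int) (hpre : Pre_vecMult M v) :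
    vecMult M v = vecMult_alt M v := by
  unfold vecMult vecMult_alt
  rw [pv_foldl_set_aux _ M.length (List.replicate M.length (0:Int)) (by simp)]
  rw [List.drop_replicate]
  simp only [Nat.sub_self, List.replicate_zero, List.append_nil]
  refine Eq.trans (pv_map_range_getD M (fun row =>
    (List.range v.length).foldl
      (fun tmp k => PySem.Int.bxor tmp (multGF16 (row.getD k 0) (v.getD k 0))) 0) []) ?_
  apply List.map_congr_left
  intro row hrow
  exact pv_row_eq row v (hpre row hrow)

-- ===== VERDICT (by name: the statement is the Claim_ definition above) =====
theorem vecMult_spec : Claim_equal_vecMult := by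
  intro M v _ hpre
  unfold Spec_vecMult
  exact pv_main M v hpre
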